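-- pv_equiv track=rewrite | github.com/svavilapalli/practicepython | stackstabilization.py | getMinimumDeflatedDiscCount
-- ===== SOURCE A (Python) =====
-- from typing import List
--
-- def getMinimumDeflatedDiscCount(N: int, R: List[int]) -> int:
--   # Write your code here
--   bottomdisc = R[-1]
--   deflationcount = 0
--
--   for i in range(N-2,-1,-1):
--     if R[i] > bottomdisc-1:
--       bottomdisc = bottomdisc-1
--       deflationcount += 1
--     else:
--       bottomdisc= R[i]
--     if bottomdisc <= 0:
--       return -1
--   return deflationcount
-- ===== SOURCE B (Python) =====
-- from typing import List
--
-- def getMinimumDeflatedDiscCount(N: int, R: List[int]) -> int: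
--   # Slack coordinates: S[i] = R[i] - i. Each disc must end strictly below the
--   # one under it, so disc i's final height is i + min(S[i:]) (suffix minimum),
--   # it is infeasible iff that is <= 0, and disc i is deflated iff the suffix
--   # minimum is strictly below its own slack S[i].
--   S = [R[i] - i for i in range(N - 1)] + [R[-1] - (N - 1)]
--   M = []  # suffix minima of S, built back to front
--   for x in reversed(S):
--     M.append(x if not M else min(x, M[-1]))
--   M.reverse()
--   if any(i + m <= 0 for i, m in enumerate(M[:-1])):
--     return -1
--   return sum(m < s for s, m in zip(S, M))
-- ===== Notes on version B (the rewrite author's own statement) =====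
-- stated objective: alternative
-- what changed: Replaces A's greedy cap recurrence (bottomdisc = min(R[i], bottomdisc-1) with an inline counter and early return) by a coordinate transform: slacks S[i] = R[i] - i, a suffix-minimum list M of S, infeasibility read off as some i + M[i] <= 0, and the deflation count as the number of positions whose suffix minimum drops below the disc's own slack.
import Mathlib
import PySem

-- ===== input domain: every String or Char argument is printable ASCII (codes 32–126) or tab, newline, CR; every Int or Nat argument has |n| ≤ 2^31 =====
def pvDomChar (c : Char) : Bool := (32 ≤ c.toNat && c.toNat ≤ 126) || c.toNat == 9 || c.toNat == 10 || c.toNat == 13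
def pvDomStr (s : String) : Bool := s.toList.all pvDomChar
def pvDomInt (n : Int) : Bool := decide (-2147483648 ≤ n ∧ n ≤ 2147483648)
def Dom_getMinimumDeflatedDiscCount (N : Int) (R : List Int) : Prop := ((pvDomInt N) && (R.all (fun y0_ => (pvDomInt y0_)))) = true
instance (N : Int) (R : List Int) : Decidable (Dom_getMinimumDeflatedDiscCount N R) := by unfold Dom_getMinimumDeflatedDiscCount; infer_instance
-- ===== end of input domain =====

-- B recasts the greedy cap recurrence as suffix minima of the slack values S[i] = R[i] - i
-- (objective: alternative algorithm via a coordinate transform).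

-- ===== PORT A =====
-- A's loop: mutable bottomdisc/deflationcount with an early 'return -1'.
def pvALoop (R : List Int) : List Int → Int → Int → Int
  | [], _, count => count
  | i :: rest, bottom, count =>
      let ri := (PySem.List.pyGet? R i).getD 0   -- Pre_ guarantees the index is in range
      if ri > bottom - 1 then
        if bottom - 1 ≤ 0 then -1 else pvALoop R rest (bottom - 1) (count + 1)
      else
        if ri ≤ 0 then -1 else pvALoop R rest ri count

def getMinimumDeflatedDiscCount (N : Int) (R : List Int) : Int :=
  let bottomdisc := (PySem.List.pyGet? R (-1)).getD 0   -- Pre_ guarantees R ≠ []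
  pvALoop R (PySem.List.pyRange (N - 2) (-1) (-1)) bottomdisc 0

-- ===== PORT B =====
-- B's suffix-minimum pass: for x in reversed(S): M.append(x if not M else min(x, M[-1]))
def pvSufLoop : List Int → List Int → List Int
  | [], M => M
  | x :: rest, M =>
      pvSufLoop rest (M ++ [match M.getLast? with | none => x | some m => min x m])

def getMinimumDeflatedDiscCount_alt (N : Int) (R : List Int) : Int :=
  let S := ((PySem.List.pyRange 0 (N - 1) 1).map
              (fun i => (PySem.List.pyGet? R i).getD 0 - i))
           ++ [(PySem.List.pyGet? R (-1)).getD 0 - (N - 1)]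
  let M := (pvSufLoop S.reverse []).reverse
  if (PySem.List.enumerate (PySem.List.slice M none (some (-1))) 0).any
       (fun p => p.1 + p.2 ≤ 0) then -1
  else (S.zip M).foldl (fun acc p => acc + (if p.2 < p.1 then 1 else 0)) 0

-- ===== PRECONDITION & SPEC =====
-- Pre_ excludes exactly the inputs where A raises IndexError: empty R (R[-1]),
-- or N - 2 reaching past the end of R inside the loop.
def Pre_getMinimumDeflatedDiscCount (N : Int) (R : List Int) : Prop :=
  R ≠ [] ∧ N ≤ (R.length : Int) + 1
instance (N : Int) (R : List Int) : Decidable (Pre_getMinimumDeflatedDiscCount N R) := by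
  unfold Pre_getMinimumDeflatedDiscCount; infer_instance

def pvWitness_getMinimumDeflatedDiscCount : Int × List Int := (5, [10, 9, 8, 7, 6])

def Spec_getMinimumDeflatedDiscCount (N : Int) (R : List Int) (out : Int) : Prop := out = getMinimumDeflatedDiscCount_alt N R
instance (N : Int) (R : List Int) (out : Int) : Decidable (Spec_getMinimumDeflatedDiscCount N R out) := by unfold Spec_getMinimumDeflatedDiscCount; infer_instance

-- ===== CLAIM (what is proved, stated in full; the proofs are below) =====
def Claim_equal_getMinimumDeflatedDiscCount : Prop := ∀ (N : Int) (R : List Int), Dom_getMinimumDeflatedDiscCount N R → Pre_getMinimumDeflatedDiscCount N R → Spec_getMinimumDeflatedDiscCount N R (getMinimumDeflatedDiscCount N R)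

-- ===== LEMMAS AND PROOFS =====

-- Reference heights: the pairs (i, cap_i) of A's greedy pass, in processing order.
def pvH (R : List Int) : List Int → Int → List (Int × Int)
  | [], _ => []
  | i :: rest, cap =>
      let c := min ((PySem.List.pyGet? R i).getD 0) (cap - 1)
      (i, c) :: pvH R rest c

-- Running minima of a value list, seeded with m.
def pvMins : List Int → Int → List Int
  | [], _ => []
  | x :: r, m => min x m :: pvMins r (min x m)

-- A's loop equals the aggregate of the reference heights.
theorem pvALoop_eq_pvH (R : List Int) (is : List Int) (b c : Int) :
    pvALoop R is b c =
      (if (pvH R is b).any (fun p => p.2 ≤ 0) then -1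
       else c + ((pvH R is b).filter
              (fun p => p.2 < (PySem.List.pyGet? R p.1).getD 0)).length) := by
  induction is generalizing b c with
  | nil => simp [pvALoop, pvH]
  | cons i rest ih =>
    simp only [pvALoop, pvH]
    set ri := (PySem.List.pyGet? R i).getD 0 with hri
    by_cases hgt : ri > b - 1
    · have hmin : min ri (b - 1) = b - 1 := min_eq_right (le_of_lt hgt)
      by_cases hz : b - 1 ≤ 0
      · simp [hgt, hz, hmin, List.any_cons]
      · simp only [hgt, if_pos, hz, if_neg, not_false_iff, hmin, List.any_cons,
          List.filter_cons]
        rw [ih]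
        have hb : ¬ (b - 1 ≤ 0) := hz
        simp only [decide_eq_true_eq, decide_false, Bool.false_or]
        split_ifs with hrest
        · rfl
        · have : decide ((b - 1) < (PySem.List.pyGet? R i).getD 0) = true := by
            simpa [← hri] using hgt
          simp only [List.length_cons]
          push_cast; ring
    · have hle : ri ≤ b - 1 := le_of_not_gt hgt
      have hmin : min ri (b - 1) = ri := min_eq_left hle
      by_cases hz : ri ≤ 0
      · simp [hgt, hz, hmin, List.any_cons]
      · simp only [hgt, if_neg, not_false_iff, hz, hmin, List.any_cons,
          List.filter_cons]
        rw [ih]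
        have hb : ¬ (ri ≤ 0) := hz
        simp only [decide_eq_true_eq, decide_false, Bool.false_or]
        split_ifs with hrest hhead
        · rfl
        · exact absurd (hri ▸ hhead) (lt_irrefl _)
        · rfl

-- B's append loop is the running-minima list.
theorem pvSufLoop_eq_pvMins (ys : List Int) (M : List Int) (m : Int)
    (h : M.getLast? = some m) : pvSufLoop ys M = M ++ pvMins ys m := by
  induction ys generalizing M m with
  | nil => simp [pvSufLoop, pvMins]
  | cons x r ih =>
    simp only [pvSufLoop, h, pvMins]
    rw [ih (M ++ [min x m]) (min x m) List.getLast?_concat]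
    simp

-- enumerate over a right-extension.
theorem pvEnumerate_concat {α : Type} (l : List α) (y : α) (s : Int) :
    PySem.List.enumerate (l ++ [y]) s = PySem.List.enumerate l s ++ [(s + l.length, y)] := by
  induction l generalizing s with
  | nil => simp [PySem.List.enumerate_nil, PySem.List.enumerate_cons]
  | cons a t ih =>
    simp [PySem.List.enumerate_cons, ih]
    ring_nf

theorem length_pvH (R : List Int) (is : List Int) (cap : Int) :
    (pvH R is cap).length = is.length := by
  induction is generalizing cap with
  | nil => rfl
  | cons i rest ih => simp [pvH, ih]

theorem map_fst_pvH (R : List Int) (is : List Int) (cap : Int) :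
    (pvH R is cap).map (·.1) = is := by
  induction is generalizing cap with
  | nil => rfl
  | cons i rest ih => simp [pvH, ih]

-- Coordinate shift: the running minima of the slacks are cap_i - i.
theorem pvMins_eq_pvH (R : List Int) (j : Nat) (cap : Int) :
    pvMins ((PySem.List.pyRange ((j : Int) - 1) (-1) (-1)).map
        (fun i => (PySem.List.pyGet? R i).getD 0 - i)) (cap - j) =
      (pvH R (PySem.List.pyRange ((j : Int) - 1) (-1) (-1)) cap).map (fun p => p.2 - p.1) := by
  induction j generalizing cap with
  | zero =>
    rw [PySem.List.pyRange_neg_one_eq_nil (by omega)]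
    rfl
  | succ j ih =>
    have hc : ((j + 1 : Nat) : Int) - 1 = (j : Int) := by push_cast; ring
    rw [hc, PySem.List.pyRange_neg_one_cons (by omega)]
    simp only [List.map_cons, pvMins, pvH]
    have h1 : min ((PySem.List.pyGet? R (j : Int)).getD 0 - (j : Int)) (cap - ((j + 1 : Nat) : Int))
        = min ((PySem.List.pyGet? R (j : Int)).getD 0) (cap - 1) - (j : Int) := by
      rw [← Int.sub_min_sub_right]
      congr 1
      push_cast; ring
    rw [h1]
    congr 1
    have := ih (min ((PySem.List.pyGet? R (j : Int)).getD 0) (cap - 1))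
    simpa using this

-- enumerate of the reversed minima aligns position k with disc k.
theorem pvEnum_pvH (R : List Int) (j : Nat) (cap : Int) :
    PySem.List.enumerate
        (((pvH R (PySem.List.pyRange ((j : Int) - 1) (-1) (-1)) cap).map
            (fun p => p.2 - p.1)).reverse) 0 =
      ((pvH R (PySem.List.pyRange ((j : Int) - 1) (-1) (-1)) cap).reverse).map
          (fun p => (p.1, p.2 - p.1)) := by
  induction j generalizing cap with
  | zero =>
    rw [PySem.List.pyRange_neg_one_eq_nil (by omega)]
    rfl
  | succ j ih =>
    have hc : ((j + 1 : Nat) : Int) - 1 = (j : Int) := by push_cast; ring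
    rw [hc, PySem.List.pyRange_neg_one_cons (by omega)]
    simp only [pvH, List.map_cons, List.reverse_cons]
    rw [pvEnumerate_concat]
    rw [ih]
    simp [length_pvH, PySem.List.length_pyRange_neg_one]

-- B's 0/1-sum over slack comparisons is A's filter count.
theorem pvSum_eq_filter (R : List Int) (L : List (Int × Int)) :
    (L.map (fun p => if p.2 - p.1 < (PySem.List.pyGet? R p.1).getD 0 - p.1 then (1 : Int) else 0)).sum
      = ((L.filter (fun p => p.2 < (PySem.List.pyGet? R p.1).getD 0)).length : Int) := by
  induction L with
  | nil => simp
  | cons a t ih =>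
    simp only [List.map_cons, List.sum_cons, List.filter_cons]
    have hc : (a.2 - a.1 < (PySem.List.pyGet? R a.1).getD 0 - a.1)
        ↔ (a.2 < (PySem.List.pyGet? R a.1).getD 0) := by omega
    by_cases h : a.2 < (PySem.List.pyGet? R a.1).getD 0
    · rw [if_pos (hc.mpr h), ih]
      simp [h]
      ring
    · rw [if_neg (fun hh => h (hc.mp hh)), ih]
      simp [h]

-- ===== VERDICT (by name: the statement is the Claim_ definition above) =====
theorem getMinimumDeflatedDiscCount_spec : Claim_equal_getMinimumDeflatedDiscCount := by
  intro N R _ _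
  unfold Spec_getMinimumDeflatedDiscCount getMinimumDeflatedDiscCount getMinimumDeflatedDiscCount_alt
  dsimp only
  by_cases hN : N ≤ 1
  · rw [PySem.List.pyRange_neg_one_eq_nil (by omega), PySem.List.pyRange_one_eq_nil (by omega)]
    simp [pvALoop, pvSufLoop, PySem.List.slice_to_neg_one, PySem.List.enumerate_nil]
  · obtain ⟨j, hj⟩ : ∃ j : Nat, (j : Int) = N - 1 := ⟨(N - 1).toNat, by omega⟩
    have h2 : N - 2 = (j : Int) - 1 := by omega
    rw [h2, ← hj]
    rw [pvALoop_eq_pvH]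
    -- B's reversed slack list is the bottom slack followed by f over A's index list
    have hrange : PySem.List.pyRange 0 (j : Int) 1
        = (PySem.List.pyRange ((j : Int) - 1) (-1) (-1)).reverse := by
      rw [PySem.List.pyRange_neg_one_eq_reverse]
      have h3 : (j : Int) - 1 + 1 = (j : Int) := by ring
      rw [h3]
      simp
    rw [hrange]
    rw [List.reverse_append, List.map_reverse, List.reverse_reverse]
    -- run B's suffix-minimum loop
    have hsuf : ∀ (ys : List Int) (m : Int),
        pvSufLoop (m :: ys) [] = m :: pvMins ys m := by
      intro ys m
      have h0 : pvSufLoop (m :: ys) [] = pvSufLoop ys [m] := by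
        simp [pvSufLoop]
      rw [h0, pvSufLoop_eq_pvMins ys [m] m (by simp)]
      simp
    simp only [List.reverse_singleton, List.singleton_append]
    rw [hsuf, pvMins_eq_pvH R j ((PySem.List.pyGet? R (-1)).getD 0)]
    rw [List.reverse_cons, PySem.List.slice_to_neg_one, List.dropLast_concat]
    rw [pvEnum_pvH]
    -- the feasibility tests agree
    have hany : (((pvH R (PySem.List.pyRange ((j : Int) - 1) (-1) (-1))
            ((PySem.List.pyGet? R (-1)).getD 0)).reverse).map
            (fun p => (p.1, p.2 - p.1))).any (fun p => p.1 + p.2 ≤ 0)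
        = ((pvH R (PySem.List.pyRange ((j : Int) - 1) (-1) (-1))
            ((PySem.List.pyGet? R (-1)).getD 0))).any (fun p => p.2 ≤ 0) := by
      rw [List.any_map, List.any_reverse]
      congr 1
      funext p
      simp only [Function.comp]
      congr 1
      simp
    rw [hany]
    -- the deflation counts agree
    have hfst : List.map (fun i => (PySem.List.pyGet? R i).getD 0 - i)
          (PySem.List.pyRange ((j : Int) - 1) (-1) (-1))
        = (pvH R (PySem.List.pyRange ((j : Int) - 1) (-1) (-1))
            ((PySem.List.pyGet? R (-1)).getD 0)).map
            (fun p => (PySem.List.pyGet? R p.1).getD 0 - p.1) := by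
      conv_lhs => rw [← map_fst_pvH R (PySem.List.pyRange ((j : Int) - 1) (-1) (-1))
        ((PySem.List.pyGet? R (-1)).getD 0)]
      rw [List.map_map]
      rfl
    have hzip : ∀ (L : List (Int × Int)) (c : Int),
        (((L.map (fun p => (PySem.List.pyGet? R p.1).getD 0 - p.1)).reverse ++ [c]).zip
          ((L.map (fun p => p.2 - p.1)).reverse ++ [c]))
        = L.reverse.map (fun p => ((PySem.List.pyGet? R p.1).getD 0 - p.1, p.2 - p.1))
            ++ [(c, c)] := by
      intro L c
      rw [List.zip_append (by simp), ← List.map_reverse, ← List.map_reverse, List.zip_map']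
      rfl
    rw [hfst, hzip, PySem.List.foldl_add, List.map_append, List.sum_append, List.map_map]
    dsimp only [Function.comp_def]
    rw [pvSum_eq_filter R]
    simp [List.filter_reverse]
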